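-- pv_equiv track=rewrite | github.com/rootztigmod/tig-js-evolve | deepevolve/utils/code.py | parse_evolve_blocks
-- ===== SOURCE A (Python) =====
-- from typing import Dict, List, Tuple
--
-- def parse_evolve_blocks(code: str) -> List[Tuple[int, int, str]]:
--     """
--     Parse evolve blocks from code
--
--     Args:
--         code: Source code with evolve blocks
--
--     Returns:
--         List of tuples (start_line, end_line, block_content)
--     """
--     lines = code.split("\n")
--     blocks = []
--
--     in_block = False
--     start_line = -1
--     block_content = []
--
--     for i, line in enumerate(lines):
--         if "DEEPEVOLVE-BLOCK-START" in line:
--             in_block = True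
--             start_line = i
--             block_content = []
--         elif "DEEPEVOLVE-BLOCK-END" in line and in_block:
--             in_block = False
--             blocks.append((start_line, i, "\n".join(block_content)))
--         elif in_block:
--             block_content.append(line)
--
--     return blocks
-- ===== SOURCE B (Python) =====
-- from typing import Dict, List, Tuple
--
-- def parse_evolve_blocks(code: str) -> List[Tuple[int, int, str]]:
--     # Staged pipeline: first extract only the marker events (line index, is_start),
--     # then pair each END with the latest unconsumed START, slicing the lines
--     # between them for the content.
--     lines = code.split("\n")
--     events = [(i, "DEEPEVOLVE-BLOCK-START" in line)
--               for i, line in enumerate(lines)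
--               if "DEEPEVOLVE-BLOCK-START" in line or "DEEPEVOLVE-BLOCK-END" in line]
--     blocks = []
--     pending = None
--     for i, is_start in events:
--         if is_start:
--             pending = i
--         elif pending is not None:
--             blocks.append((pending, i, "\n".join(lines[pending + 1:i])))
--             pending = None
--     return blocks
-- ===== Notes on version B (the rewrite author's own statement) =====
-- stated objective: alternative
-- what changed: B replaces A's single stateful line loop (in_block flag plus a per-line content accumulator) by a two-stage pipeline: a comprehension first reduces the lines to marker events (index, is_start), then a pairing pass matches each END with the latest pending START and recovers the content by slicing lines[start+1:end].
import Mathlib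
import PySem

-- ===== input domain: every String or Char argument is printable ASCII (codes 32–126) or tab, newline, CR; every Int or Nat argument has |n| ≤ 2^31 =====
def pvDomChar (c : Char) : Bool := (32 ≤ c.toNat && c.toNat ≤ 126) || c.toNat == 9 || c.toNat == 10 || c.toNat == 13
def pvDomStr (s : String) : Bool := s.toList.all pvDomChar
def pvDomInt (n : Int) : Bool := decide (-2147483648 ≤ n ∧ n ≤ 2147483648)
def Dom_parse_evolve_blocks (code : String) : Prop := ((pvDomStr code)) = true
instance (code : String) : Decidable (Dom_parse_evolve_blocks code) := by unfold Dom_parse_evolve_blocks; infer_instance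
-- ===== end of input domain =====

-- B replaces A's stateful line loop with per-line accumulator by a two-stage pipeline:
-- extract marker events, then pair STARTs with ENDs, slicing lines for the content
-- (objective: alternative decomposition, same cost).

-- ===== PORT A =====
-- state: (blocks, in_block, start_line, block_content); i is the enumerate counter
def pvLoopA : List String → Int → (List (Int × Int × String) × Bool × Int × List String) →
    (List (Int × Int × String) × Bool × Int × List String)
  | [], _, st => st
  | line :: rest, i, (bs, ib, sl, bc) =>
    if PySem.Str.isIn "DEEPEVOLVE-BLOCK-START" line then
      pvLoopA rest (i + 1) (bs, true, i, [])
    else if PySem.Str.isIn "DEEPEVOLVE-BLOCK-END" line && ib then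
      pvLoopA rest (i + 1) (bs ++ [(sl, i, PySem.Str.join "\n" bc)], false, sl, bc)
    else if ib then
      pvLoopA rest (i + 1) (bs, ib, sl, bc ++ [line])
    else
      pvLoopA rest (i + 1) (bs, ib, sl, bc)

def parse_evolve_blocks (code : String) : List (Int × Int × String) :=
  let lines := (PySem.Str.split? code "\n").getD []
  (pvLoopA lines 0 ([], false, -1, [])).1

-- ===== PORT B =====
-- stage 1: the comprehension's per-element filter/map (keep marker lines as (index, is_start))
def pvEvent (p : Int × String) : Option (Int × Bool) :=
  if PySem.Str.isIn "DEEPEVOLVE-BLOCK-START" p.2 || PySem.Str.isIn "DEEPEVOLVE-BLOCK-END" p.2 then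
    some (p.1, PySem.Str.isIn "DEEPEVOLVE-BLOCK-START" p.2)
  else
    none

-- stage 2: pair each END with the latest pending START; content by slicing lines
def pvPair (lines : List String) : List (Int × Bool) → Option Int → List (Int × Int × String) →
    List (Int × Int × String)
  | [], _, bs => bs
  | (i, isStart) :: es, pending, bs =>
    if isStart then
      pvPair lines es (some i) bs
    else
      match pending with
      | some s =>
          pvPair lines es none
            (bs ++ [(s, i, PySem.Str.join "\n" (PySem.List.slice lines (some (s + 1)) (some i)))])
      | none => pvPair lines es pending bs

def parse_evolve_blocks_alt (code : String) : List (Int × Int × String) :=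
  let lines := (PySem.Str.split? code "\n").getD []
  let events := (PySem.List.enumerate lines 0).filterMap pvEvent
  pvPair lines events none []

-- ===== PRECONDITION & SPEC =====
def Spec_parse_evolve_blocks (code : String) (out : List (Int × Int × String)) : Prop := out = parse_evolve_blocks_alt code
instance (code : String) (out : List (Int × Int × String)) : Decidable (Spec_parse_evolve_blocks code out) := by unfold Spec_parse_evolve_blocks; infer_instance

-- ===== CLAIM (what is proved, stated in full; the proofs are below) =====
def Claim_equal_parse_evolve_blocks : Prop := ∀ (code : String), Dom_parse_evolve_blocks code → Spec_parse_evolve_blocks code (parse_evolve_blocks code)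

-- ===== LEMMAS AND PROOFS =====

-- Loop invariant relating A's single pass to B's event pipeline: B's pending start is
-- A's in_block/start_line pair, and when in_block holds, start_line is a Nat index k < j
-- whose accumulated content is exactly the lines strictly between the START marker and j.
theorem pvLoop_eq (lines : List String) :
    ∀ (rest : List String) (j : Nat) (bs : List (Int × Int × String)) (ib : Bool) (sl : Int)
      (bc : List String),
      lines.drop j = rest →
      (ib = true → ∃ k : Nat, sl = (k : Int) ∧ k < j ∧ bc = (lines.drop (k + 1)).take (j - k - 1)) →
      (pvLoopA rest (j : Int) (bs, ib, sl, bc)).1 =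
        pvPair lines ((PySem.List.enumerate rest (j : Int)).filterMap pvEvent)
          (if ib then some sl else none) bs := by
  intro rest
  induction rest with
  | nil => intro j bs ib sl bc _ _; simp [pvLoopA, pvPair]
  | cons line rest ih =>
    intro j bs ib sl bc hdrop hinv
    have hline : lines[j]? = some line := by
      have h0 : (lines.drop j)[0]? = some line := by rw [hdrop]; rfl
      rwa [List.getElem?_drop] at h0
    have hdrop' : lines.drop (j + 1) = rest := by
      have h1 : lines.drop (j + 1) = (lines.drop j).drop 1 := by rw [List.drop_drop]
      rw [h1, hdrop]; rfl
    have hcast : (j : Int) + 1 = ((j + 1 : Nat) : Int) := by push_cast; ring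
    rw [PySem.List.enumerate_cons]
    by_cases hs : PySem.Str.isIn "DEEPEVOLVE-BLOCK-START" line = true
    · -- START branch: A sets (true, j, []); B's event is (j, true), pending := some j
      have hsC := hs; simp at hsC
      have hev : pvEvent ((j : Int), line) = some ((j : Int), true) := by
        simp [pvEvent, hsC]
      rw [List.filterMap_cons, hev]
      have hA : pvLoopA (line :: rest) (j : Int) (bs, ib, sl, bc)
          = pvLoopA rest ((j : Int) + 1) (bs, true, (j : Int), []) := by
        simp [pvLoopA, hsC]
      have hB : ∀ p, pvPair lines (((j : Int), true) :: (PySem.List.enumerate rest ((j : Int) + 1)).filterMap pvEvent) p bs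
          = pvPair lines ((PySem.List.enumerate rest ((j : Int) + 1)).filterMap pvEvent) (some (j : Int)) bs := by
        intro p; simp [pvPair]
      rw [hA, hB, hcast]
      simpa using ih (j + 1) bs true (j : Int) [] hdrop' (fun _ => ⟨j, rfl, by omega, by simp⟩)
    · have hsC := hs; simp at hsC
      by_cases he : PySem.Str.isIn "DEEPEVOLVE-BLOCK-END" line = true
      · -- END marker line: B's event is (j, false)
        have heC := he; simp at heC
        have hev : pvEvent ((j : Int), line) = some ((j : Int), false) := by
          simp [pvEvent, hsC, heC]
        rw [List.filterMap_cons, hev]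
        cases hib : ib with
        | true =>
          obtain ⟨k, hsl, hkj, hbc⟩ := hinv hib
          have hslice : PySem.List.slice lines (some (sl + 1)) (some (j : Int)) = bc := by
            rw [hsl, hbc]
            have hk1 : ((k : Int) + 1) = ((k + 1 : Nat) : Int) := by push_cast; ring
            rw [hk1, PySem.List.slice_natCast, Nat.sub_sub]
          have hA : pvLoopA (line :: rest) (j : Int) (bs, true, sl, bc)
              = pvLoopA rest ((j : Int) + 1) (bs ++ [(sl, (j : Int), PySem.Str.join "\n" bc)], false, sl, bc) := by
            simp [pvLoopA, hsC, heC]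
          have hB : pvPair lines (((j : Int), false) :: (PySem.List.enumerate rest ((j : Int) + 1)).filterMap pvEvent) (some sl) bs
              = pvPair lines ((PySem.List.enumerate rest ((j : Int) + 1)).filterMap pvEvent) none
                  (bs ++ [(sl, (j : Int), PySem.Str.join "\n" (PySem.List.slice lines (some (sl + 1)) (some (j : Int))))]) := by
            simp [pvPair]
          rw [if_pos rfl, hA, hB, hslice, hcast]
          simpa using ih (j + 1) (bs ++ [(sl, (j : Int), PySem.Str.join "\n" bc)]) false sl bc hdrop' (by simp)
        | false =>
          have hA : pvLoopA (line :: rest) (j : Int) (bs, false, sl, bc)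
              = pvLoopA rest ((j : Int) + 1) (bs, false, sl, bc) := by
            simp [pvLoopA, hsC, heC]
          have hB : pvPair lines (((j : Int), false) :: (PySem.List.enumerate rest ((j : Int) + 1)).filterMap pvEvent) none bs
              = pvPair lines ((PySem.List.enumerate rest ((j : Int) + 1)).filterMap pvEvent) none bs := by
            simp [pvPair]
          rw [if_neg (by simp), hA, hB, hcast]
          simpa using ih (j + 1) bs false sl bc hdrop' (by simp)
      · -- no marker on this line: no event; A accumulates or idles
        have heC := he; simp at heC
        have hev : pvEvent ((j : Int), line) = none := by
          simp [pvEvent, hsC, heC]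
        rw [List.filterMap_cons, hev]
        cases hib : ib with
        | true =>
          obtain ⟨k, hsl, hkj, hbc⟩ := hinv hib
          have hA : pvLoopA (line :: rest) (j : Int) (bs, true, sl, bc)
              = pvLoopA rest ((j : Int) + 1) (bs, true, sl, bc ++ [line]) := by
            simp [pvLoopA, hsC, heC]
          have hbc' : bc ++ [line] = (lines.drop (k + 1)).take (j + 1 - k - 1) := by
            have hidx : (lines.drop (k + 1))[j - k - 1]? = some line := by
              rw [List.getElem?_drop]
              have hkj1 : k + 1 + (j - k - 1) = j := by omega
              rw [hkj1, hline]
            have hsucc : j + 1 - k - 1 = (j - k - 1) + 1 := by omega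
            rw [hsucc, List.take_add_one, hidx, hbc]
            simp
          rw [if_pos rfl, hA, hcast]
          simpa using ih (j + 1) bs true sl (bc ++ [line]) hdrop'
            (fun _ => ⟨k, hsl, by omega, hbc'⟩)
        | false =>
          have hA : pvLoopA (line :: rest) (j : Int) (bs, false, sl, bc)
              = pvLoopA rest ((j : Int) + 1) (bs, false, sl, bc) := by
            simp [pvLoopA, hsC, heC]
          rw [if_neg (by simp), hA, hcast]
          simpa using ih (j + 1) bs false sl bc hdrop' (by simp)

-- ===== VERDICT (by name: the statement is the Claim_ definition above) =====
theorem parse_evolve_blocks_spec : Claim_equal_parse_evolve_blocks := by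
  intro code _
  unfold Spec_parse_evolve_blocks parse_evolve_blocks parse_evolve_blocks_alt
  have h := pvLoop_eq ((PySem.Str.split? code "\n").getD []) ((PySem.Str.split? code "\n").getD [])
    0 [] false (-1) [] (by simp) (by simp)
  simpa using h
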